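-- pv_equiv track=rewrite | github.com/iamayuu/LeetCode-Questions | 3761-minimum-absolute-distance-between-mirror-pairs/3761-minimum-absolute-distance-between-mirror-pairs.py | minMirrorPairDistance
-- ===== SOURCE A (Python) =====
-- from typing import List
--
-- def minMirrorPairDistance(nums: List[int]) -> int:
--     #Solution1 Brute Force -  TLE
--     # n = len(nums)
--     # ans = float("inf")
--     # for i in range(n-1):
--     #     num = nums[i]
--     #     rev_s=""
--     #     for s in str(num):
--     #         rev_s = s+rev_s
--     #     rev_num=int(rev_s)
--     #     j=i+1
--     #     while j<n:
--     #         if nums[j]==rev_num: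
--     #             ans = min(ans, abs(i-j))
--     #         j+=1
--     # return -1 if ans == float("inf") else ans
--
--     #Solution2
--     n = len(nums)
--     ans = float("inf")
--     hmap = dict()
--     for i in range(n):
--         num = nums[i]
--         if num in hmap:
--             ans = min(ans, i-hmap[num])
--         rev_s=str(num)[::-1]
--         rev_num=int(rev_s)
--         hmap[rev_num]=i
--     return -1 if ans == float("inf") else ans
-- ===== SOURCE B (Python) =====
-- from typing import List
--
--
-- def _min_cross_gap(ps, qs, best):
--     # min of best and {q - p : p in ps, q in qs, p < q}; ps, qs sorted increasing
--     a = b = 0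
--     while a < len(ps) and b < len(qs):
--         if qs[b] <= ps[a]:
--             b += 1
--         else:
--             d = qs[b] - ps[a]
--             if best is None or d < best:
--                 best = d
--             a += 1
--     return best
--
--
-- def minMirrorPairDistance(nums: List[int]) -> int:
--     pos = {}
--     for i, v in enumerate(nums):
--         pos.setdefault(v, []).append(i)
--     best = None
--     for v, ps in pos.items():
--         qs = pos.get(int(str(v)[::-1]))
--         if qs is not None:
--             best = _min_cross_gap(ps, qs, best)
--     return -1 if best is None else best
-- ===== Notes on version B (the rewrite author's own statement) =====
-- stated objective: alternative
-- what changed: Instead of A's single left-to-right scan keeping a dict from reversed values to their latest index, B first groups all indices by value into a dict of sorted position lists, then for each distinct value v merges v's positions against the positions of reverse(v) with a two-pointer walk to find the closest pair.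
import Mathlib
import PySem

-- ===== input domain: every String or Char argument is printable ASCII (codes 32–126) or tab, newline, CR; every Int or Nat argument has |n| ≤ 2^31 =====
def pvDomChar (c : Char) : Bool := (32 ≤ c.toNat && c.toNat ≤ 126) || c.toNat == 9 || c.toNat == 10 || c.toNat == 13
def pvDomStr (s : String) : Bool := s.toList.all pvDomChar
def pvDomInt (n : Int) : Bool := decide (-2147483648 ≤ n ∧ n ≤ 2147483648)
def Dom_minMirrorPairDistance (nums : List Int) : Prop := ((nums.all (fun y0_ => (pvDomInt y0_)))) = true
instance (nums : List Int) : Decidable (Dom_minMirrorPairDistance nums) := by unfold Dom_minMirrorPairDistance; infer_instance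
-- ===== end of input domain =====

-- B replaces A's single scan with a reversed-value-keyed dict by grouping indices per value
-- and running a two-pointer merge per distinct value (alternative decomposition, same cost).


-- shared helper: int(str(v)[::-1]); the .getD 0 is only reached where int() would raise
-- (negative v), which Pre_ excludes
def pyRev (v : Int) : Int :=
  (PySem.Int.ofStr? ((PySem.Str.slice? (PySem.Int.toStr v) none none (-1)).getD "")).getD 0

-- ===== PORT A =====
def minMirrorPairDistance (nums : List Int) : Int :=
  let n : Int := PySem.List.len nums
  let res := (PySem.List.pyRange 0 n 1).foldl
    (fun (st : Option Int × PySem.Dict Int Int) i =>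
      let num := PySem.List.pyGetD nums i 0
      let ans := match st.2.get? num with
        | some j => some (match st.1 with | none => i - j | some a => min a (i - j))
        | none => st.1
      (ans, st.2.insert (pyRev num) i))
    (none, PySem.Dict.empty)
  match res.1 with
  | none => -1
  | some a => a

-- ===== PORT B =====
-- 'if best is None or d < best: best = d'
def bump (best : Option Int) (d : Int) : Int :=
  match best with
  | none => d
  | some b => if d < b then d else b

def twoPtrGap : List Int → List Int → Option Int → Option Int
  | _, [], best => best
  | [], _ :: _, best => best
  | p :: ps, q :: qs, best =>
      if q ≤ p then twoPtrGap (p :: ps) qs best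
      else twoPtrGap ps (q :: qs) (some (bump best (q - p)))
  termination_by ps qs _ => ps.length + qs.length

def minMirrorPairDistance_alt (nums : List Int) : Int :=
  let pos := (PySem.List.enumerate nums).foldl
    (fun d p => d.modify p.2 [] (· ++ [p.1])) PySem.Dict.empty
  let best := pos.items.foldl
    (fun best p =>
      match pos.get? (pyRev p.1) with
      | none => best
      | some qs => twoPtrGap p.2 qs best) none
  match best with
  | none => -1
  | some b => b

-- ===== PRECONDITION & SPEC =====
-- Pre_ excludes lists with a negative element: there Python A raises ValueError
-- (int("…-") from the digit reversal); B raises the same way.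
def Pre_minMirrorPairDistance (nums : List Int) : Prop := ∀ x ∈ nums, 0 ≤ x
instance (nums : List Int) : Decidable (Pre_minMirrorPairDistance nums) := by
  unfold Pre_minMirrorPairDistance; infer_instance
def pvWitness_minMirrorPairDistance : List Int := [12, 5, 21, 5]

def Spec_minMirrorPairDistance (nums : List Int) (out : Int) : Prop := out = minMirrorPairDistance_alt nums
instance (nums : List Int) (out : Int) : Decidable (Spec_minMirrorPairDistance nums out) := by unfold Spec_minMirrorPairDistance; infer_instance

-- ===== CLAIM (what is proved, stated in full; the proofs are below) =====
def Claim_equal_minMirrorPairDistance : Prop := ∀ (nums : List Int), Dom_minMirrorPairDistance nums → Pre_minMirrorPairDistance nums → Spec_minMirrorPairDistance nums (minMirrorPairDistance nums)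

-- ===== LEMMAS AND PROOFS =====
def stepA (nums : List Int) (st : Option Int × PySem.Dict Int Int) (i : Int) :
    Option Int × PySem.Dict Int Int :=
  let num := PySem.List.pyGetD nums i 0
  let ans := match st.2.get? num with
    | some j => some (match st.1 with | none => i - j | some a => min a (i - j))
    | none => st.1
  (ans, st.2.insert (pyRev num) i)

def AF (nums : List Int) (k : Nat) : Option Int × PySem.Dict Int Int :=
  (PySem.List.pyRange 0 (k : Int) 1).foldl (stepA nums) (none, PySem.Dict.empty)

theorem portA_eq (nums : List Int) :
    minMirrorPairDistance nums =
      match (AF nums nums.length).1 with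
      | none => -1
      | some a => a := by
  simp only [minMirrorPairDistance, AF, PySem.List.len_eq]
  rfl

def IsMinP (P : Int → Prop) : Option Int → Prop
  | none => ∀ c, ¬ P c
  | some m => P m ∧ ∀ c, P c → m ≤ c

def CandLt (nums : List Int) (k : Int) (c : Int) : Prop :=
  ∃ j i : Int, 0 ≤ j ∧ j < i ∧ i < k ∧
    PySem.List.pyGetD nums i 0 = pyRev (PySem.List.pyGetD nums j 0) ∧ c = i - j

-- the invariant carried by A's loop state at bound k
def InvA (nums : List Int) (k : Int) (st : Option Int × PySem.Dict Int Int) : Prop :=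
  (∀ key j, st.2.get? key = some j →
      0 ≤ j ∧ j < k ∧ pyRev (PySem.List.pyGetD nums j 0) = key ∧
      ∀ j', j < j' → j' < k → pyRev (PySem.List.pyGetD nums j' 0) ≠ key)
  ∧ (∀ key, st.2.get? key = none →
      ∀ j, 0 ≤ j → j < k → pyRev (PySem.List.pyGetD nums j 0) ≠ key)
  ∧ IsMinP (CandLt nums k) st.1

theorem stepA_inv (nums : List Int) (k : Int) (hk : 0 ≤ k)
    (st : Option Int × PySem.Dict Int Int) (h : InvA nums k st) :
    InvA nums (k + 1) (stepA nums st k) := by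
  obtain ⟨hS, hN, hM⟩ := h
  refine ⟨?_, ?_, ?_⟩
  · intro key j hj
    simp only [stepA, PySem.Dict.get?_insert] at hj
    by_cases hkey : key = pyRev (PySem.List.pyGetD nums k 0)
    · rw [if_pos hkey] at hj
      obtain rfl : j = k := by injection hj with hj; omega
      exact ⟨hk, by omega, hkey.symm, fun j' h1 h2 => by omega⟩
    · rw [if_neg hkey] at hj
      obtain ⟨h0, h1, h2, h3⟩ := hS key j hj
      refine ⟨h0, by omega, h2, fun j' hj1 hj2 => ?_⟩
      by_cases hj' : j' = k
      · subst hj'; exact fun hc => hkey hc.symm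
      · exact h3 j' hj1 (by omega)
  · intro key hkeyn
    simp only [stepA, PySem.Dict.get?_insert] at hkeyn
    by_cases hkey : key = pyRev (PySem.List.pyGetD nums k 0)
    · rw [if_pos hkey] at hkeyn; exact absurd hkeyn (by simp)
    · rw [if_neg hkey] at hkeyn
      intro j h0 h1
      by_cases hj : j = k
      · subst hj; exact fun hc => hkey hc.symm
      · exact hN key hkeyn j h0 (by omega)
  · have hsplit : ∀ c, CandLt nums (k + 1) c ↔
        CandLt nums k c ∨
        ∃ j : Int, 0 ≤ j ∧ j < k ∧
          PySem.List.pyGetD nums k 0 = pyRev (PySem.List.pyGetD nums j 0) ∧ c = k - j := by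
      intro c
      constructor
      · rintro ⟨j, i, h0, h1, h2, h3, h4⟩
        by_cases hi : i = k
        · subst hi; right; exact ⟨j, h0, h1, h3, h4⟩
        · left; exact ⟨j, i, h0, h1, by omega, h3, h4⟩
      · rintro (⟨j, i, h0, h1, h2, h3, h4⟩ | ⟨j, h0, h1, h2, h3⟩)
        · exact ⟨j, i, h0, h1, by omega, h3, h4⟩
        · exact ⟨j, k, h0, h1, by omega, h2, h3⟩
    have hans : (stepA nums st k).1 =
        match st.2.get? (PySem.List.pyGetD nums k 0) with
        | some j => some (match st.1 with | none => k - j | some a => min a (k - j))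
        | none => st.1 := rfl
    rw [hans]
    cases hg : st.2.get? (PySem.List.pyGetD nums k 0) with
    | none =>
      have hempty : ∀ c, ¬ (∃ j : Int, 0 ≤ j ∧ j < k ∧
          PySem.List.pyGetD nums k 0 = pyRev (PySem.List.pyGetD nums j 0) ∧ c = k - j) := by
        rintro c ⟨j, h0, h1, h2, _⟩
        exact hN _ hg j h0 h1 h2.symm
      cases ho : st.1 with
      | none =>
        intro c hc
        rcases (hsplit c).1 hc with hc' | hc'
        · exact (ho ▸ hM) c hc'
        · exact hempty c hc'
      | some a =>
        obtain ⟨ha1, ha2⟩ := ho ▸ hM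
        refine ⟨(hsplit a).2 (Or.inl ha1), fun c hc => ?_⟩
        rcases (hsplit c).1 hc with hc' | hc'
        · exact ha2 c hc'
        · exact absurd hc' (hempty c)
    | some j =>
      obtain ⟨h0, h1, h2, h3⟩ := hS _ j hg
      -- k - j is the least new candidate
      have hnewmem : ∃ j' : Int, 0 ≤ j' ∧ j' < k ∧
          PySem.List.pyGetD nums k 0 = pyRev (PySem.List.pyGetD nums j' 0) ∧ (k - j : Int) = k - j' :=
        ⟨j, h0, h1, h2.symm, rfl⟩
      have hnewle : ∀ c, (∃ j' : Int, 0 ≤ j' ∧ j' < k ∧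
          PySem.List.pyGetD nums k 0 = pyRev (PySem.List.pyGetD nums j' 0) ∧ c = k - j') →
          k - j ≤ c := by
        rintro c ⟨j', h0', h1', h2', rfl⟩
        have : ¬ j < j' := fun hlt => h3 j' hlt h1' h2'.symm
        omega
      cases ho : st.1 with
      | none =>
        have hMn := ho ▸ hM
        refine ⟨(hsplit _).2 (Or.inr hnewmem), fun c hc => ?_⟩
        rcases (hsplit c).1 hc with hc' | hc'
        · exact absurd hc' (hMn c)
        · exact hnewle c hc'
      | some a =>
        obtain ⟨ha1, ha2⟩ := ho ▸ hM
        show IsMinP (CandLt nums (k + 1)) (some (min a (k - j)))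
        constructor
        · rcases min_cases a (k - j) with ⟨hm, _⟩ | ⟨hm, _⟩
          · rw [hm]; exact (hsplit a).2 (Or.inl ha1)
          · rw [hm]; exact (hsplit _).2 (Or.inr hnewmem)
        · intro c hc
          rcases (hsplit c).1 hc with hc' | hc'
          · exact le_trans (min_le_left _ _) (ha2 c hc')
          · exact le_trans (min_le_right _ _) (hnewle c hc')

theorem AF_succ (nums : List Int) (k : Nat) :
    AF nums (k + 1) = stepA nums (AF nums k) (k : Int) := by
  unfold AF
  rw [show ((k + 1 : Nat) : Int) = (k : Int) + 1 by push_cast; ring,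
      PySem.List.pyRange_one_succ_right (a := 0) (b := (k : Int)) (by positivity),
      List.foldl_append]
  rfl

theorem AF_inv (nums : List Int) (k : Nat) : InvA nums (k : Int) (AF nums k) := by
  induction k with
  | zero =>
    refine ⟨?_, ?_, ?_⟩
    · intro key j hj
      simp [AF, PySem.List.pyRange_one_eq_nil (le_refl 0), PySem.Dict.get?_empty] at hj
    · intro key _ j h0 hk; omega
    · rintro c ⟨j, i, h0, h1, h2, _⟩; omega
  | succ k ih =>
    rw [AF_succ]
    have := stepA_inv nums (k : Int) (by positivity) _ ih
    rwa [show ((k + 1 : Nat) : Int) = (k : Int) + 1 by push_cast; ring]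

def IsCand (nums : List Int) (c : Int) : Prop := CandLt nums (nums.length : Int) c

theorem lemA (nums : List Int) : IsMinP (IsCand nums) (AF nums nums.length).1 :=
  (AF_inv nums nums.length).2.2

def buildPos (nums : List Int) : PySem.Dict Int (List Int) :=
  (PySem.List.enumerate nums).foldl (fun d p => d.modify p.2 [] (· ++ [p.1])) PySem.Dict.empty

def stepB (pos : PySem.Dict Int (List Int)) (best : Option Int) (p : Int × List Int) : Option Int :=
  match pos.get? (pyRev p.1) with
  | none => best
  | some qs => twoPtrGap p.2 qs best

theorem portB_eq (nums : List Int) :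
    minMirrorPairDistance_alt nums =
      match (buildPos nums).items.foldl (stepB (buildPos nums)) none with
      | none => -1
      | some b => b := rfl

def idxs (nums : List Int) (v : Int) : List Int :=
  (PySem.List.pyRange 0 (nums.length : Int) 1).filter
    (fun j => PySem.List.pyGetD nums j 0 == v)

theorem mem_idxs (nums : List Int) (v j : Int) :
    j ∈ idxs nums v ↔ 0 ≤ j ∧ j < (nums.length : Int) ∧ PySem.List.pyGetD nums j 0 = v := by
  simp [idxs, List.mem_filter, PySem.List.mem_pyRange_one, and_assoc]

theorem idxs_sorted (nums : List Int) (v : Int) : (idxs nums v).Pairwise (· ≤ ·) :=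
  ((PySem.List.pairwise_lt_pyRange_one 0 (nums.length : Int)).filter _).imp le_of_lt

theorem buildPos_getD (nums : List Int) (v : Int) :
    (buildPos nums).getD v [] = idxs nums v := by
  have he : buildPos nums =
      ((PySem.List.pyRange 0 (nums.length : Int) 1).map
        (fun j => (PySem.List.pyGetD nums j 0, j))).foldl
        (fun d p => d.modify p.1 [] (· ++ [p.2])) PySem.Dict.empty := by
    unfold buildPos
    rw [PySem.List.enumerate_eq_map_pyRange nums 0, List.foldl_map, List.foldl_map]
    simp [PySem.List.len_eq]
  rw [he, PySem.Dict.getD_foldl_modify_append, List.filter_map, List.map_map]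
  simp [idxs, Function.comp_def]

theorem buildPos_keys (nums : List Int) :
    (buildPos nums).keys =
      PySem.Set.ofList ((PySem.List.pyRange 0 (nums.length : Int) 1).map
        (fun j => PySem.List.pyGetD nums j 0)) := by
  have h : (buildPos nums).keys =
      PySem.Set.update (PySem.Dict.empty : PySem.Dict Int (List Int)).keys
        ((PySem.List.enumerate nums).map (fun p => p.2)) :=
    PySem.Dict.keys_foldl_modify_key (PySem.List.enumerate nums) (fun p => p.2) []
      (fun _ p => (· ++ [p.1])) PySem.Dict.empty
  rw [h, PySem.Dict.keys_empty, PySem.Set.update_nil_left]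
  rw [PySem.List.enumerate_eq_map_pyRange nums 0, List.map_map]
  simp [PySem.List.len_eq, Function.comp_def]

theorem mem_buildPos_keys (nums : List Int) (v : Int) :
    v ∈ (buildPos nums).keys ↔ idxs nums v ≠ [] := by
  rw [buildPos_keys, PySem.Set.mem_ofList]
  constructor
  · intro h
    simp only [List.mem_map] at h
    obtain ⟨j, hj, hv⟩ := h
    rw [PySem.List.mem_pyRange_one] at hj
    intro hnil
    have : j ∈ idxs nums v := (mem_idxs nums v j).2 ⟨hj.1, hj.2, hv⟩
    simp [hnil] at this
  · intro h
    obtain ⟨j, hj⟩ := List.exists_mem_of_ne_nil _ h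
    obtain ⟨h0, h1, h2⟩ := (mem_idxs nums v j).1 hj
    exact List.mem_map.2 ⟨j, PySem.List.mem_pyRange_one.2 ⟨h0, h1⟩, h2⟩

theorem buildPos_get?_none (nums : List Int) (v : Int)
    (h : (buildPos nums).get? v = none) : idxs nums v = [] := by
  rw [PySem.Dict.get?_eq_none_iff_not_mem_keys, mem_buildPos_keys] at h
  by_contra hne; exact h hne

theorem buildPos_get?_some (nums : List Int) (v : Int) (qs : List Int)
    (h : (buildPos nums).get? v = some qs) : qs = idxs nums v := by
  have := PySem.Dict.getD_eq_get?_getD (buildPos nums) v []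
  rw [h] at this
  rw [buildPos_getD] at this
  exact this.symm

theorem buildPos_nodup_keys (nums : List Int) : (buildPos nums).keys.Nodup :=
  PySem.Dict.nodup_keys_foldl_modify_key (PySem.List.enumerate nums) (fun p => p.2) []
    (fun _ p => (· ++ [p.1])) PySem.Dict.empty PySem.Dict.nodup_keys_empty

def Cross (ps qs : List Int) (c : Int) : Prop := ∃ p ∈ ps, ∃ q ∈ qs, p < q ∧ c = q - p

theorem IsMinP_congr {P Q : Int → Prop} {o : Option Int} (h : IsMinP P o)
    (hPQ : ∀ c, P c → Q c) (hQP : ∀ c, Q c → ∃ c', P c' ∧ c' ≤ c) : IsMinP Q o := by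
  cases o with
  | none =>
    intro c hc
    obtain ⟨c', hc', _⟩ := hQP c hc
    exact h c' hc'
  | some m =>
    refine ⟨hPQ m h.1, fun c hc => ?_⟩
    obtain ⟨c', hc', hle⟩ := hQP c hc
    exact le_trans (h.2 c' hc') hle

theorem twoPtrGap_min (n : Nat) : ∀ (ps qs : List Int) (best : Option Int) (P : Int → Prop),
    ps.length + qs.length ≤ n → ps.Pairwise (· ≤ ·) → qs.Pairwise (· ≤ ·) →
    IsMinP P best → IsMinP (fun c => P c ∨ Cross ps qs c) (twoPtrGap ps qs best) := by
  induction n with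
  | zero =>
    intro ps qs best P hn _ _ h
    obtain rfl : ps = [] := by cases ps <;> simp_all
    obtain rfl : qs = [] := by cases qs <;> simp_all
    rw [show twoPtrGap [] [] best = best by simp [twoPtrGap]]
    exact IsMinP_congr h (fun c hc => Or.inl hc)
      (fun c hc => by rcases hc with hc | ⟨p, hp, _⟩; exacts [⟨c, hc, le_refl c⟩, absurd hp (by simp)])
  | succ n ih =>
    intro ps qs best P hn hp hq h
    match ps, qs with
    | ps, [] =>
      rw [show twoPtrGap ps [] best = best by cases ps <;> simp [twoPtrGap]]
      exact IsMinP_congr h (fun c hc => Or.inl hc)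
        (fun c hc => by
          rcases hc with hc | ⟨p, _, q, hq', _⟩
          exacts [⟨c, hc, le_refl c⟩, absurd hq' (by simp)])
    | [], q :: qs =>
      rw [show twoPtrGap [] (q :: qs) best = best by simp [twoPtrGap]]
      exact IsMinP_congr h (fun c hc => Or.inl hc)
        (fun c hc => by
          rcases hc with hc | ⟨p, hp', _⟩
          exacts [⟨c, hc, le_refl c⟩, absurd hp' (by simp)])
    | p :: ps, q :: qs =>
      rw [twoPtrGap.eq_def]
      simp only []
      by_cases hle : q ≤ p
      · rw [if_pos hle]
        have step := ih (p :: ps) qs best P (by simp at hn ⊢; omega) hp hq.of_cons h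
        refine IsMinP_congr step ?_ ?_
        · rintro c (hc | ⟨p', hp', q', hq', hlt, rfl⟩)
          · exact Or.inl hc
          · exact Or.inr ⟨p', hp', q', List.mem_cons_of_mem q hq', hlt, rfl⟩
        · rintro c (hc | ⟨p', hp', q', hq', hlt, rfl⟩)
          · exact ⟨c, Or.inl hc, le_refl c⟩
          · rcases List.mem_cons.1 hq' with heq | hq''
            · -- q' = q pairs with nothing: p ≤ p' and q ≤ p
              have hpp : p ≤ p' := by
                rcases List.mem_cons.1 hp' with heq' | hmem
                · omega
                · exact (List.pairwise_cons.1 hp).1 p' hmem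
              omega
            · exact ⟨q' - p', Or.inr ⟨p', hp', q', hq'', hlt, rfl⟩, le_refl _⟩
      · rw [if_neg hle]
        have hpq : p < q := by omega
        have hmid : IsMinP (fun c => P c ∨ c = q - p) (some (bump best (q - p))) := by
          cases best with
          | none =>
            show IsMinP (fun c => P c ∨ c = q - p) (some (q - p))
            exact ⟨Or.inr rfl, fun c hc => by
              rcases hc with hc | rfl
              exacts [absurd hc (h c), le_refl _]⟩
          | some b =>
            obtain ⟨hb1, hb2⟩ := h
            show IsMinP (fun c => P c ∨ c = q - p) (some (if q - p < b then q - p else b))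
            by_cases hlt : q - p < b
            · rw [if_pos hlt]
              exact ⟨Or.inr rfl, fun c hc => by
                rcases hc with hc | rfl
                exacts [le_trans (le_of_lt hlt) (hb2 c hc), le_refl _]⟩
            · rw [if_neg hlt]
              exact ⟨Or.inl hb1, fun c hc => by
                rcases hc with hc | rfl
                exacts [hb2 c hc, by omega]⟩
        have step := ih ps (q :: qs) (some (bump best (q - p))) (fun c => P c ∨ c = q - p)
          (by simp at hn ⊢; omega) hp.of_cons hq hmid
        refine IsMinP_congr step ?_ ?_
        · rintro c ((hc | rfl) | ⟨p', hp', q', hq', hlt, rfl⟩)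
          · exact Or.inl hc
          · exact Or.inr ⟨p, List.mem_cons_self, q, List.mem_cons_self, hpq, rfl⟩
          · exact Or.inr ⟨p', List.mem_cons_of_mem p hp', q', hq', hlt, rfl⟩
        · rintro c (hc | ⟨p', hp', q', hq', hlt, rfl⟩)
          · exact ⟨c, Or.inl (Or.inl hc), le_refl c⟩
          · rcases List.mem_cons.1 hp' with rfl | hp''
            · -- pairs using p: q ≤ q' so q - p ≤ q' - p
              have hqq : q ≤ q' := by
                rcases List.mem_cons.1 hq' with heq | hmem
                · omega
                · exact (List.pairwise_cons.1 hq).1 q' hmem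
              exact ⟨q - p', Or.inl (Or.inr rfl), by omega⟩
            · exact ⟨q' - p', Or.inr ⟨p', hp'', q', hq', hlt, rfl⟩, le_refl _⟩

theorem foldB (nums : List Int) : ∀ (L : List (Int × List Int)) (best : Option Int) (P : Int → Prop),
    IsMinP P best → (∀ pr ∈ L, pr.2.Pairwise (· ≤ ·)) →
    IsMinP (fun c => P c ∨ ∃ pr ∈ L, Cross pr.2 (idxs nums (pyRev pr.1)) c)
      (L.foldl (stepB (buildPos nums)) best) := by
  intro L
  induction L with
  | nil =>
    intro best P h _
    refine IsMinP_congr h (fun c hc => Or.inl hc) ?_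
    rintro c (hc | ⟨pr, hpr, _⟩)
    exacts [⟨c, hc, le_refl c⟩, absurd hpr (by simp)]
  | cons pr L ihL =>
    intro best P h hL
    rw [List.foldl_cons]
    have hmid : IsMinP (fun c => P c ∨ Cross pr.2 (idxs nums (pyRev pr.1)) c)
        (stepB (buildPos nums) best pr) := by
      unfold stepB
      cases hg : (buildPos nums).get? (pyRev pr.1) with
      | none =>
        have hnil := buildPos_get?_none nums _ hg
        refine IsMinP_congr h (fun c hc => Or.inl hc) ?_
        rintro c (hc | ⟨p, _, q, hq, _⟩)
        · exact ⟨c, hc, le_refl c⟩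
        · rw [hnil] at hq; exact absurd hq (by simp)
      | some qs =>
        rw [buildPos_get?_some nums _ qs hg] at *
        exact twoPtrGap_min (pr.2.length + (idxs nums (pyRev pr.1)).length) pr.2 _ best P
          (le_refl _) (hL pr List.mem_cons_self) (idxs_sorted nums _) h
    have step := ihL (stepB (buildPos nums) best pr)
      (fun c => P c ∨ Cross pr.2 (idxs nums (pyRev pr.1)) c) hmid
      (fun pr' hpr' => hL pr' (List.mem_cons_of_mem pr hpr'))
    refine IsMinP_congr step ?_ ?_
    · rintro c ((hc | hc) | ⟨pr', hpr', hc⟩)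
      · exact Or.inl hc
      · exact Or.inr ⟨pr, List.mem_cons_self, hc⟩
      · exact Or.inr ⟨pr', List.mem_cons_of_mem pr hpr', hc⟩
    · rintro c (hc | ⟨pr', hpr', hc⟩)
      · exact ⟨c, Or.inl (Or.inl hc), le_refl c⟩
      · rcases List.mem_cons.1 hpr' with heq | hmem
        · exact ⟨c, Or.inl (Or.inr (heq ▸ hc)), le_refl c⟩
        · exact ⟨c, Or.inr ⟨pr', hmem, hc⟩, le_refl c⟩

theorem lemB (nums : List Int) :
    IsMinP (IsCand nums) ((buildPos nums).items.foldl (stepB (buildPos nums)) none) := by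
  have hitems : (buildPos nums).items =
      (buildPos nums).keys.map (fun k => (k, (buildPos nums).getD k [])) :=
    PySem.Dict.items_eq_map_keys (buildPos nums) (buildPos_nodup_keys nums) []
  have hL : ∀ pr ∈ (buildPos nums).items, pr.2.Pairwise (· ≤ ·) := by
    intro pr hpr
    rw [hitems] at hpr
    obtain ⟨k, _, rfl⟩ := List.mem_map.1 hpr
    rw [buildPos_getD]
    exact idxs_sorted nums k
  have hfold := foldB nums (buildPos nums).items none (fun _ => False)
    (fun c hc => hc) hL
  refine IsMinP_congr hfold ?_ ?_
  · rintro c (hc | ⟨pr, hpr, p, hp, q, hq, hlt, rfl⟩)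
    · exact absurd hc id
    · -- a cross pair is a candidate
      rw [hitems] at hpr
      obtain ⟨k, hk, rfl⟩ := List.mem_map.1 hpr
      rw [buildPos_getD] at hp
      obtain ⟨hp0, hp1, hp2⟩ := (mem_idxs nums k p).1 hp
      obtain ⟨hq0, hq1, hq2⟩ := (mem_idxs nums (pyRev k) q).1 hq
      exact ⟨p, q, hp0, hlt, hq1, by rw [hq2, hp2], rfl⟩
  · rintro c ⟨j, i, h0, h1, h2, h3, rfl⟩
    refine ⟨i - j, Or.inr ?_, le_refl _⟩
    have hv : PySem.List.pyGetD nums j 0 ∈ nums :=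
      PySem.List.pyGetD_mem nums 0 (by simp [PySem.Raise.InRange]; omega)
    have hkey : PySem.List.pyGetD nums j 0 ∈ (buildPos nums).keys := by
      rw [mem_buildPos_keys]
      intro hnil
      have : j ∈ idxs nums (PySem.List.pyGetD nums j 0) :=
        (mem_idxs nums _ j).2 ⟨h0, by omega, rfl⟩
      simp [hnil] at this
    refine ⟨(PySem.List.pyGetD nums j 0, (buildPos nums).getD (PySem.List.pyGetD nums j 0) []),
      ?_, ?_⟩
    · rw [hitems]
      exact List.mem_map.2 ⟨_, hkey, rfl⟩
    · refine ⟨j, ?_, i, ?_, h1, rfl⟩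
      · rw [buildPos_getD]
        exact (mem_idxs nums _ j).2 ⟨h0, by omega, rfl⟩
      · exact (mem_idxs nums _ i).2 ⟨by omega, h2, h3⟩

theorem IsMinP_unique {P : Int → Prop} {o o' : Option Int}
    (h : IsMinP P o) (h' : IsMinP P o') : o = o' := by
  cases o with
  | none => cases o' with
    | none => rfl
    | some m => exact absurd h'.1 (h m)
  | some m => cases o' with
    | none => exact absurd h.1 (h' m)
    | some m' => exact congrArg some (le_antisymm (h.2 m' h'.1) (h'.2 m h.1))

theorem final (nums : List Int) : minMirrorPairDistance nums = minMirrorPairDistance_alt nums := by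
  rw [portA_eq, portB_eq, IsMinP_unique (lemA nums) (lemB nums)]

-- ===== VERDICT (by name: the statement is the Claim_ definition above) =====
theorem minMirrorPairDistance_spec : Claim_equal_minMirrorPairDistance := by
  intro nums _ _
  exact (final nums).symm ▸ rfl
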